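-- pv_equiv track=rewrite | github.com/limetree06/ProblemSolving | basic/section3/씨름선수.py | athlete_num
-- ===== SOURCE A (Python) =====
-- def athlete_num(spec):
--     count = 0
--     tallest = 0
--     for height, weight in spec:
--         if height > tallest:
--             count = count + 1
--             tallest = height
--     return count
-- ===== SOURCE B (Python) =====
-- def athlete_num(spec):
--     prefix = [0]
--     for height, weight in spec:
--         prefix.append(max(prefix[-1], height))
--     return sum(1 for prev, cur in zip(prefix, prefix[1:]) if cur > prev)
-- ===== Notes on version B (the rewrite author's own statement) =====
-- stated objective: alternative
-- what changed: Replaces the fused count-and-update loop with two passes: build the running-maximum prefix table seeded with 0, then count strict increases between adjacent table entries.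
import Mathlib
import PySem

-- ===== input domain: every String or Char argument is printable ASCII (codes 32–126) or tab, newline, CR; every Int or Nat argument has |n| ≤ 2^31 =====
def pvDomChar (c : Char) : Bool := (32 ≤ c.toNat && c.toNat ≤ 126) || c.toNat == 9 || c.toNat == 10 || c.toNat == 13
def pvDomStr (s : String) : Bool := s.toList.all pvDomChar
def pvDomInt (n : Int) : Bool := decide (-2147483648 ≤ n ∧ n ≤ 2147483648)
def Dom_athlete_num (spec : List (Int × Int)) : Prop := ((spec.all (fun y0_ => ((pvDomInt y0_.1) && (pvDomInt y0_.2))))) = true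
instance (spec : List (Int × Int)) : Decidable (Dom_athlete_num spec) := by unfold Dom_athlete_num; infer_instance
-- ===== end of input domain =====

-- B replaces A's fused count-and-update loop by two passes: build the running-maximum prefix table seeded with 0, then count strict increases between adjacent entries (objective: alternative decomposition, same O(n) cost).
-- ===== PORT A =====
def athlete_num (spec : List (Int × Int)) : Int :=
  (spec.foldl (fun (st : Int × Int) hw =>
      if hw.1 > st.2 then (st.1 + 1, hw.1) else st) (0, 0)).1

-- ===== PORT B =====
def athlete_num_alt (spec : List (Int × Int)) : Int :=
  let pre := spec.foldl (fun (acc : List Int) hw => acc ++ [max (acc.getLastD 0) hw.1]) [0]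
  Int.ofNat (((pre.zip (pre.drop 1)).filter (fun pc => decide (pc.2 > pc.1))).length)

-- ===== PRECONDITION & SPEC =====
def Spec_athlete_num (spec : List (Int × Int)) (out : Int) : Prop := out = athlete_num_alt spec
instance (spec : List (Int × Int)) (out : Int) : Decidable (Spec_athlete_num spec out) := by unfold Spec_athlete_num; infer_instance

-- ===== CLAIM (what is proved, stated in full; the proofs are below) =====
def Claim_equal_athlete_num : Prop := ∀ (spec : List (Int × Int)), Dom_athlete_num spec → Spec_athlete_num spec (athlete_num spec)

-- ===== LEMMAS AND PROOFS =====

-- ===== VERDICT (by name: the statement is the Claim_ definition above) =====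
-- running count of new maxima starting from tallest t (proof-only helper)
def pvG (t : Int) : List Int → Int
  | [] => 0
  | h :: tl => if h > t then 1 + pvG h tl else pvG t tl

-- prefix-maximum table starting from t (proof-only helper)
def pvScan (t : Int) : List Int → List Int
  | [] => [t]
  | h :: tl => t :: pvScan (max t h) tl

theorem lemA (spec : List (Int × Int)) : ∀ (c t : Int),
    (spec.foldl (fun (st : Int × Int) hw =>
      if hw.1 > st.2 then (st.1 + 1, hw.1) else st) (c, t)).1
    = c + pvG t (spec.map Prod.fst) := by
  induction spec with
  | nil => intro c t; simp [pvG]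
  | cons hw tl ih =>
    intro c t
    simp only [List.foldl_cons, List.map_cons, pvG]
    by_cases h : hw.1 > t
    · simp [h, ih]; ring
    · simp [h, ih]

theorem lemPre (hs : List (Int × Int)) : ∀ (p : List Int) (t : Int),
    hs.foldl (fun (acc : List Int) hw => acc ++ [max (acc.getLastD 0) hw.1]) (p ++ [t])
    = p ++ pvScan t (hs.map Prod.fst) := by
  induction hs with
  | nil => intro p t; simp [pvScan]
  | cons hw tl ih =>
    intro p t
    simp only [List.foldl_cons, List.map_cons, pvScan]
    have hl : (p ++ [t]).getLastD 0 = t := by simp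
    rw [hl]
    have := ih (p ++ [t]) (max t hw.1)
    simpa using this

theorem pvScan_head (t : Int) (hs : List Int) : ∃ r, pvScan t hs = t :: r := by
  cases hs <;> exact ⟨_, rfl⟩

theorem lemCount (hs : List Int) : ∀ (t : Int),
    Int.ofNat ((((pvScan t hs).zip ((pvScan t hs).drop 1)).filter
      (fun pc : Int × Int => decide (pc.2 > pc.1))).length)
    = pvG t hs := by
  induction hs with
  | nil => intro t; simp [pvScan, pvG]
  | cons h tl ih =>
    intro t
    simp only [pvScan, pvG]
    obtain ⟨r, hr⟩ := pvScan_head (max t h) tl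
    rw [hr]
    simp only [List.drop_succ_cons, List.drop_zero, List.zip_cons_cons, List.filter_cons]
    have hih := ih (max t h)
    rw [hr] at hih
    simp only [List.drop_succ_cons, List.drop_zero] at hih
    by_cases hlt : h > t
    · have hmax : max t h = h := max_eq_right (le_of_lt hlt)
      have hd : decide ((max t h) > t) = true := by simp [hmax, hlt]
      rw [hd]
      simp only [List.length_cons, hlt, if_true]
      rw [hmax] at hih ⊢
      rw [← hih]
      simp only [Int.ofNat_eq_natCast]
      push_cast
      ring
    · have hmax : max t h = t := max_eq_left (not_lt.mp hlt)
      have hd : decide ((max t h) > t) = false := by simp [hmax]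
      simp only [hd, Bool.false_eq_true, if_false, hlt]
      rw [hmax] at hih ⊢
      rw [← hih]

theorem athlete_num_spec : Claim_equal_athlete_num := by
  intro spec _
  unfold Spec_athlete_num athlete_num athlete_num_alt
  have hfold : spec.foldl (fun (acc : List Int) hw => acc ++ [max (acc.getLastD 0) hw.1]) [0]
      = pvScan 0 (spec.map Prod.fst) := by
    simpa using lemPre spec [] 0
  simp only [hfold]
  rw [lemA spec 0 0, lemCount]
  simp
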